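-- pv_equiv track=rewrite | github.com/federicomassa/racecar_2d | racecar_2d/tests/test_array.py | get_sweeping
-- ===== SOURCE A (Python) =====
-- def get_sweeping(vector, index=-1, interval=-1):
--     index_provided = index >= 0
--     interval_provided = interval >= 0
--
--     sweep = []
--     if not index_provided and not interval_provided:
--         sweep = [i for i in range(len(vector))]
--     elif index_provided:
--         # How many points does the sweep contain? Interval is on the left and on the right of the index
--         if interval_provided:
--             npoints = interval*2 + 1
--         else:
--             npoints = len(vector)
--
--         current_index = index
--         current_step = 1
--         current_sign = -1
--         sweep.append(current_index)
--         for i in range(npoints-1):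
--             current_index += current_step*current_sign
--             current_step += 1
--             current_sign = -current_sign
--
--             actual_index = current_index
--             if current_index < 0:
--                 actual_index = len(vector) + current_index
--             elif current_index >= len(vector):
--                 actual_index = current_index - len(vector)
--
--             sweep.append(actual_index)
--
--     return sweep
-- ===== SOURCE B (Python) =====
-- def get_sweeping(vector, index=-1, interval=-1):
--     n = len(vector)
--     if index < 0:
--         return list(range(n)) if interval < 0 else []
--     npoints = interval * 2 + 1 if interval >= 0 else n
--
--     def wrap(i):
--         return i + n if i < 0 else (i - n if i >= n else i)
--
--     def offset(i):
--         # position i of the sweep sits at signed offset: 0, -1, +1, -2, +2, ...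
--         return i // 2 if i % 2 == 0 else -((i + 1) // 2)
--
--     return [index] + [wrap(index + offset(i)) for i in range(1, npoints)]
-- ===== Notes on version B (the rewrite author's own statement) =====
-- stated objective: alternative
-- what changed: Replaces A's stateful loop (running current_index/current_step/current_sign mutated across iterations) by a position-indexed comprehension: each sweep element is computed independently from its position i via the closed-form signed offset (i//2 if i even else -((i+1)//2)), wrapped once.
import Mathlib
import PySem

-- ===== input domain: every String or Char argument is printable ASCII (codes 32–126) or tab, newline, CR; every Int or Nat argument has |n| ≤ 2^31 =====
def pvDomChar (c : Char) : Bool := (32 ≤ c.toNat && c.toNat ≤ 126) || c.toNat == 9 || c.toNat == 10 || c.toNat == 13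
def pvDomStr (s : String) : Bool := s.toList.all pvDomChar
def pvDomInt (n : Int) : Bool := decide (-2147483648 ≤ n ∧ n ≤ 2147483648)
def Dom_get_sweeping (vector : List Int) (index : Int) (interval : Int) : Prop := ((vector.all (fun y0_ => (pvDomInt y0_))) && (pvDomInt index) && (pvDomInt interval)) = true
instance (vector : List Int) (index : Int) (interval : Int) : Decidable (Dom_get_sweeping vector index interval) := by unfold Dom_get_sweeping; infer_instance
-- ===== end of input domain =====

-- B replaces A's stateful alternating loop by a per-position closed-form offset applied in a
-- comprehension over range(1, npoints); same return value everywhere (objective: alternative).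

-- ===== PORT A =====
-- A's for-loop, one call per iteration of `for i in range(npoints-1)`, same state
def aLoop (vlen : Nat) (ci cs sg : Int) (sweep : List Int) : Nat → List Int
  | 0 => sweep
  | i + 1 =>
    let ci' := ci + cs * sg
    let cs' := cs + 1
    let sg' := -sg
    let ai := if ci' < 0 then (vlen : Int) + ci' else if ci' ≥ (vlen : Int) then ci' - (vlen : Int) else ci'
    aLoop vlen ci' cs' sg' (sweep ++ [ai]) i

def get_sweeping (vector : List Int) (index : Int) (interval : Int) : List Int :=
  let index_provided := index ≥ 0
  let interval_provided := interval ≥ 0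
  if ¬ index_provided ∧ ¬ interval_provided then
    (List.range vector.length).map (fun i => (i : Int))
  else if index_provided then
    let npoints : Int := if interval_provided then interval * 2 + 1 else (vector.length : Int)
    aLoop vector.length index 1 (-1) [index] (npoints - 1).toNat
  else
    []

-- ===== PORT B =====
def bWrap (n : Nat) (i : Int) : Int :=
  if i < 0 then i + n else if i ≥ (n : Int) then i - n else i

-- closed-form signed offset of sweep position i: 0, -1, +1, -2, +2, …  (Python // on nonnegative ints = Int./)
def bOffset (i : Int) : Int :=
  if i % 2 == 0 then i / 2 else -((i + 1) / 2)

def get_sweeping_alt (vector : List Int) (index : Int) (interval : Int) : List Int :=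
  let n := vector.length
  if index < 0 then
    (if interval < 0 then (List.range n).map (fun i => (i : Int)) else [])
  else
    let npoints : Int := if interval ≥ 0 then interval * 2 + 1 else (n : Int)
    [index] ++ (PySem.List.pyRange 1 npoints 1).map (fun i => bWrap n (index + bOffset i))

-- ===== PRECONDITION & SPEC =====
def Spec_get_sweeping (vector : List Int) (index : Int) (interval : Int) (out : List Int) : Prop := out = get_sweeping_alt vector index interval
instance (vector : List Int) (index : Int) (interval : Int) (out : List Int) : Decidable (Spec_get_sweeping vector index interval out) := by unfold Spec_get_sweeping; infer_instance

-- ===== CLAIM (what is proved, stated in full; the proofs are below) =====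
def Claim_equal_get_sweeping : Prop := ∀ (vector : List Int) (index : Int) (interval : Int), Dom_get_sweeping vector index interval → Spec_get_sweeping vector index interval (get_sweeping vector index interval)

-- ===== LEMMAS AND PROOFS =====

theorem bOffset_succ (t : Int) (ht : 0 ≤ t) :
    bOffset (t + 1) = bOffset t + (t + 1) * (if t % 2 == 0 then -1 else 1) := by
  unfold bOffset
  rcases Int.emod_two_eq_zero_or_one t with h | h <;> simp [h] <;> omega

theorem aLoop_closed (n : Nat) (index : Int) :
    ∀ (k : Nat) (t : Int) (sweep : List Int), 0 ≤ t →
      aLoop n (index + bOffset t) (t + 1) (if t % 2 == 0 then -1 else 1) sweep k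
        = sweep ++ (List.range k).map (fun (j : Nat) => bWrap n (index + bOffset (t + 1 + (j : Int)))) := by
  intro k
  induction k with
  | zero => intro t sweep _; simp [aLoop]
  | succ k ih =>
    intro t sweep ht
    rw [aLoop]
    have hci : index + bOffset t + (t + 1) * (if t % 2 == 0 then -1 else 1)
        = index + bOffset (t + 1) := by rw [bOffset_succ t ht]; ring
    have hsg : -(if t % 2 == 0 then (-1 : Int) else 1) = (if (t + 1) % 2 == 0 then (-1 : Int) else 1) := by
      rcases Int.emod_two_eq_zero_or_one t with h | h <;>
        simp [h, show (t + 1) % 2 = (t % 2 + 1) % 2 from by omega]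
    simp only [hci, hsg]
    rw [ih (t + 1) _ (by omega)]
    rw [List.range_succ_eq_map, List.map_cons, List.map_map]
    simp only [List.append_assoc, List.singleton_append, Nat.cast_zero, add_zero]
    congr 1
    congr 1
    · unfold bWrap; split_ifs <;> omega
    · congr 1
      funext j
      simp only [Function.comp_apply]
      have h : t + 1 + 1 + (j : Int) = t + 1 + ((j + 1 : Nat) : Int) := by push_cast; ring
      rw [h]

theorem sweep_branch (n : Nat) (index npoints : Int) :
    aLoop n index 1 (-1) [index] (npoints - 1).toNat
      = [index] ++ (PySem.List.pyRange 1 npoints 1).map (fun i => bWrap n (index + bOffset i)) := by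
  rw [PySem.List.pyRange_one, List.map_map]
  have h0 := aLoop_closed n index ((npoints - 1).toNat) 0 [index] le_rfl
  simpa [Function.comp_def, show bOffset 0 = 0 from by simp [bOffset]] using h0

-- ===== VERDICT (by name: the statement is the Claim_ definition above) =====
theorem get_sweeping_spec : Claim_equal_get_sweeping := by
  intro vector index interval _
  unfold Spec_get_sweeping get_sweeping get_sweeping_alt
  by_cases hi : index ≥ 0
  · by_cases ht : interval ≥ 0 <;>
      simp only [hi, ht, not_true, not_false_iff, false_and, and_false, if_false, if_true,
        if_neg (show ¬ index < 0 by omega)] <;>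
      exact sweep_branch vector.length index _
  · by_cases ht : interval ≥ 0 <;>
      simp only [if_pos (show index < 0 by omega)] <;>
      simp [hi, ht]
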